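-- pv_equiv track=rewrite | github.com/Gawendz/NSS | nss_paths/algorithms.py | are_link_disjoint
-- ===== SOURCE A (Python) =====
-- from itertools import pairwise
--
-- Path = list[int]
--
-- def path_edges(path: Path) -> list[tuple[int, int]]:
--     return list(pairwise(path))
--
-- def undirected_edge(edge: tuple[int, int]) -> tuple[int, int]:
--     u, v = edge
--     return (u, v) if u <= v else (v, u)
--
-- def are_link_disjoint(paths: tuple[Path, ...]) -> bool:
--     used: set[tuple[int, int]] = set()
--     for path in paths:
--         for edge in path_edges(path):
--             normalized = undirected_edge(edge)
--             if normalized in used: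
--                 return False
--             used.add(normalized)
--     return True
-- ===== SOURCE B (Python) =====
-- def are_link_disjoint(paths):
--     edges = sorted((u, v) if u <= v else (v, u)
--                    for path in paths for u, v in zip(path, path[1:]))
--     return all(a != b for a, b in zip(edges, edges[1:]))
-- ===== Notes on version B (the rewrite author's own statement) =====
-- stated objective: alternative
-- what changed: Replaces A's incremental set with per-edge membership tests and early return by sort-then-scan: sort all normalized undirected edges lexicographically once, then check that no two adjacent edges in the sorted list are equal.
import Mathlib
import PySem

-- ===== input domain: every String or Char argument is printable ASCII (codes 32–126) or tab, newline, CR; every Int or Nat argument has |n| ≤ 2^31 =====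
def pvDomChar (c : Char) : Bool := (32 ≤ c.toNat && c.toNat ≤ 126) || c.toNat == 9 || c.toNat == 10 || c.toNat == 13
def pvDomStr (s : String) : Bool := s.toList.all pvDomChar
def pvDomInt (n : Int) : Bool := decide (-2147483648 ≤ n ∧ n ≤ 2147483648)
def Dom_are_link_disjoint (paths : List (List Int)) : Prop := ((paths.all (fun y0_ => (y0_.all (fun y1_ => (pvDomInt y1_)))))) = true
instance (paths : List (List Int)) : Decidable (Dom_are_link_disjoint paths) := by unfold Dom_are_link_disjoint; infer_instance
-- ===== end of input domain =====

-- B replaces A's incremental set with per-edge membership tests and early return by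
-- sort-then-scan: sort all normalized edges once, then check no two adjacent are equal.

-- ===== PORT A =====
-- path_edges(path) = list(pairwise(path))
def path_edges (path : List Int) : List (Int × Int) := path.zip path.tail

-- undirected_edge(edge)
def undirected_edge (edge : Int × Int) : Int × Int :=
  if edge.1 ≤ edge.2 then (edge.1, edge.2) else (edge.2, edge.1)

-- inner 'for edge in path_edges(path)' loop; none = the early 'return False'
def pvInner (used : PySem.Set (Int × Int)) : List (Int × Int) → Option (PySem.Set (Int × Int))
  | [] => some used
  | edge :: rest =>
    let normalized := undirected_edge edge
    if PySem.Set.contains used normalized then none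
    else pvInner (PySem.Set.add used normalized) rest

-- outer 'for path in paths' loop
def pvOuter (used : PySem.Set (Int × Int)) : List (List Int) → Bool
  | [] => true
  | path :: ps =>
    match pvInner used (path_edges path) with
    | none => false
    | some used' => pvOuter used' ps

def are_link_disjoint (paths : List (List Int)) : Bool :=
  pvOuter PySem.Set.empty paths

-- ===== PORT B =====
-- sorted(<generator of normalized edges>); Python's tuple sort is PySem.List.sorted2 (lex key)
def are_link_disjoint_alt (paths : List (List Int)) : Bool :=
  let edges := PySem.List.sorted2
    (paths.flatMap (fun path =>
      (path.zip path.tail).map (fun e => if e.1 ≤ e.2 then (e.1, e.2) else (e.2, e.1))))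
    (fun e => e.1) (fun e => e.2)
  (edges.zip edges.tail).all (fun p => p.1 ≠ p.2)

-- ===== PRECONDITION & SPEC =====
def Spec_are_link_disjoint (paths : List (List Int)) (out : Bool) : Prop := out = are_link_disjoint_alt paths
instance (paths : List (List Int)) (out : Bool) : Decidable (Spec_are_link_disjoint paths out) := by unfold Spec_are_link_disjoint; infer_instance

-- ===== CLAIM (what is proved, stated in full; the proofs are below) =====
def Claim_equal_are_link_disjoint : Prop := ∀ (paths : List (List Int)), Dom_are_link_disjoint paths → Spec_are_link_disjoint paths (are_link_disjoint paths)

-- ===== LEMMAS AND PROOFS =====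

-- the flat list of normalized edges of all paths
def pvEdges (paths : List (List Int)) : List (Int × Int) :=
  paths.flatMap (fun path => (path.zip path.tail).map undirected_edge)

-- ----- A-side: are_link_disjoint paths = decide (pvEdges paths).Nodup -----

lemma pvInner_eq (es : List (Int × Int)) : ∀ (used : List (Int × Int)), used.Nodup →
    pvInner used es =
      if (used ++ es.map undirected_edge).Nodup then some (used ++ es.map undirected_edge) else none := by
  induction es with
  | nil => intro used h; simp [pvInner, h]
  | cons e rest ih =>
    intro used h
    simp only [pvInner, List.map_cons]
    by_cases hmem : undirected_edge e ∈ used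
    · rw [if_pos (by simpa [PySem.Set.contains_iff] using hmem)]
      rw [if_neg]
      intro hnd
      exact (List.disjoint_of_nodup_append hnd) hmem (by simp)
    · rw [if_neg (by simpa [PySem.Set.contains_iff] using hmem)]
      rw [PySem.Set.add_of_not_mem hmem,
        ih (used ++ [undirected_edge e]) ((List.nodup_append).2 ⟨h, by simp, by
          intro a ha b hb; simp at hb; subst hb; exact fun hc => hmem (hc ▸ ha)⟩)]
      have harr : used ++ [undirected_edge e] ++ rest.map undirected_edge
          = used ++ undirected_edge e :: rest.map undirected_edge := by simp
      rw [harr]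

lemma pvOuter_eq (ps : List (List Int)) : ∀ (used : List (Int × Int)), used.Nodup →
    pvOuter used ps = decide (used ++ pvEdges ps).Nodup := by
  induction ps with
  | nil =>
    intro used h
    simp [pvOuter, pvEdges]
    exact h
  | cons p ps ih =>
    intro used h
    simp only [pvOuter, pvInner_eq _ _ h, path_edges]
    by_cases hnd : (used ++ (p.zip p.tail).map undirected_edge).Nodup
    · rw [if_pos hnd]
      have hrec := ih (used ++ (p.zip p.tail).map undirected_edge) hnd
      simp only [hrec]
      congr 1
      simp [pvEdges]
    · rw [if_neg hnd]
      have hno : ¬ (used ++ pvEdges (p :: ps)).Nodup := by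
        intro hall
        exact hnd (hall.sublist (by simp [pvEdges]))
      simp [hno]

-- ----- B-side: the sorted-adjacent scan also decides Nodup -----

-- lexicographic ≤ on pairs (Python's tuple order)
def pvLexLe (a b : Int × Int) : Prop := a.1 < b.1 ∨ (a.1 = b.1 ∧ a.2 ≤ b.2)

lemma pvLexLe_trans {a b c : Int × Int} (h1 : pvLexLe a b) (h2 : pvLexLe b c) : pvLexLe a c := by
  unfold pvLexLe at *; rcases h1 with h1 | ⟨h1, h1'⟩ <;> rcases h2 with h2 | ⟨h2, h2'⟩ <;> [left; left; left; right] <;> omega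

lemma pvLexLe_antisymm {a b : Int × Int} (h1 : pvLexLe a b) (h2 : pvLexLe b a) : a = b := by
  unfold pvLexLe at *
  have : a.1 = b.1 ∧ a.2 = b.2 := by omega
  exact Prod.ext this.1 this.2

-- the strict comparison sorted2 uses, as a Bool
def pvLtB (a b : Int × Int) : Bool :=
  decide (a.1 < b.1) || (!decide (b.1 < a.1) && decide (a.2 < b.2))

lemma pvLtB_true_le {a b : Int × Int} (h : pvLtB a b = true) : pvLexLe a b := by
  unfold pvLtB at h; unfold pvLexLe; simp at h; omega

lemma pvLtB_false_le {a b : Int × Int} (h : pvLtB a b = false) : pvLexLe b a := by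
  unfold pvLtB at h; unfold pvLexLe; simp at h; omega

lemma pvInsertBy_pairwise (x : Int × Int) (acc : List (Int × Int))
    (h : acc.Pairwise pvLexLe) : (PySem.List.insertBy pvLtB x acc).Pairwise pvLexLe := by
  induction acc with
  | nil => simp [PySem.List.insertBy]
  | cons y ys ih =>
    rw [List.pairwise_cons] at h
    simp only [PySem.List.insertBy]
    by_cases hb : pvLtB x y = true
    · rw [if_pos hb]
      refine List.pairwise_cons.2 ⟨?_, List.pairwise_cons.2 ⟨h.1, h.2⟩⟩
      intro z hz
      rcases List.mem_cons.1 hz with rfl | hz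
      · exact pvLtB_true_le hb
      · exact pvLexLe_trans (pvLtB_true_le hb) (h.1 z hz)
    · rw [if_neg hb]
      refine List.pairwise_cons.2 ⟨?_, ih h.2⟩
      intro z hz
      rcases (PySem.List.mem_insertBy pvLtB x z ys).1 hz with rfl | hz
      · exact pvLtB_false_le (Bool.eq_false_iff.2 hb)
      · exact h.1 z hz

lemma pvSorted2_pairwise (xs : List (Int × Int)) :
    (PySem.List.sorted2 xs (fun e => e.1) (fun e => e.2)).Pairwise pvLexLe := by
  have heq : PySem.List.sorted2 xs (fun e => e.1) (fun e => e.2)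
      = xs.foldl (fun acc x => PySem.List.insertBy pvLtB x acc) [] := rfl
  rw [heq]
  have : ∀ (l : List (Int × Int)) (acc : List (Int × Int)), acc.Pairwise pvLexLe →
      (l.foldl (fun acc x => PySem.List.insertBy pvLtB x acc) acc).Pairwise pvLexLe := by
    intro l
    induction l with
    | nil => intro acc h; exact h
    | cons x t ih => intro acc h; exact ih _ (pvInsertBy_pairwise x acc h)
  exact this xs [] (by simp)

-- on a lex-sorted list, "no two adjacent equal" decides Nodup
lemma pvAdjAll_eq_nodup (ys : List (Int × Int)) (h : ys.Pairwise pvLexLe) :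
    ((ys.zip ys.tail).all (fun p => p.1 ≠ p.2)) = decide ys.Nodup := by
  induction ys with
  | nil => simp
  | cons y t ih =>
    rw [List.pairwise_cons] at h
    cases t with
    | nil => simp
    | cons z t' =>
      have hrec := ih h.2
      have hyz : pvLexLe y z := h.1 z (by simp)
      simp only [List.tail_cons, List.zip_cons_cons, List.all_cons] at hrec ⊢
      rw [hrec]
      by_cases heq : y = z
      · subst heq
        simp
      · have hnotmem : y ∉ z :: t' := by
          intro hmem
          rcases List.mem_cons.1 hmem with rfl | hmem
          · exact heq rfl
          · have hzy : pvLexLe z y := (List.pairwise_cons.1 h.2).1 y hmem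
            exact heq (pvLexLe_antisymm (h.1 z (by simp)) hzy)
        by_cases hnd : (z :: t').Nodup
        · have : (y :: z :: t').Nodup := List.nodup_cons.2 ⟨hnotmem, hnd⟩
          simp [heq, hnd, this]
        · have : ¬ (y :: z :: t').Nodup := fun hc => hnd (List.nodup_cons.1 hc).2
          simp [heq, hnd, this]

-- ===== VERDICT (by name: the statement is the Claim_ definition above) =====
theorem are_link_disjoint_spec : Claim_equal_are_link_disjoint := by
  intro paths _
  unfold Spec_are_link_disjoint are_link_disjoint are_link_disjoint_alt
  rw [pvOuter_eq paths PySem.Set.empty (by simp [PySem.Set.empty])]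
  have hempty : (PySem.Set.empty ++ pvEdges paths) = pvEdges paths := by
    simp [PySem.Set.empty]
  rw [hempty]
  have hedges : paths.flatMap (fun path =>
      (path.zip path.tail).map (fun e => if e.1 ≤ e.2 then (e.1, e.2) else (e.2, e.1)))
      = pvEdges paths := by
    unfold pvEdges undirected_edge
    congr 1
  simp only [hedges]
  rw [pvAdjAll_eq_nodup _ (pvSorted2_pairwise (pvEdges paths))]
  have hperm := PySem.List.sorted2_perm (pvEdges paths) (fun e => e.1) (fun e => e.2) false
  simp [hperm.nodup_iff]
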